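-- pv_equiv track=rewrite | github.com/tracholar/ml-homework-cz | lcode/tracholar/div.py | findMaxMultipy
-- ===== SOURCE A (Python) =====
-- def findMaxMultipy(dividend, divisor):
--     z = 0
--     n = 0
--     max_divisor = divisor
--     while divisor <= dividend:
--         if z == 0:
--             z = 1
--         else:
--             z = z << 1
--         n += 1
--
--         max_divisor = divisor
--         divisor = divisor << 1
--     return z, n, max_divisor
-- ===== SOURCE B (Python) =====
-- def findMaxMultipy(dividend, divisor):
--     if divisor > dividend:
--         return 0, 0, divisor
--     k = (dividend // divisor).bit_length()
--     return 1 << (k - 1), k, divisor << (k - 1)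
-- ===== Notes on version B (the rewrite author's own statement) =====
-- stated objective: simpler
-- what changed: Replaced the iterative doubling loop by a closed form: k = (dividend // divisor).bit_length() gives the loop count, and the result is (1 << (k-1), k, divisor << (k-1)), with (0, 0, divisor) when divisor > dividend.
import Mathlib
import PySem

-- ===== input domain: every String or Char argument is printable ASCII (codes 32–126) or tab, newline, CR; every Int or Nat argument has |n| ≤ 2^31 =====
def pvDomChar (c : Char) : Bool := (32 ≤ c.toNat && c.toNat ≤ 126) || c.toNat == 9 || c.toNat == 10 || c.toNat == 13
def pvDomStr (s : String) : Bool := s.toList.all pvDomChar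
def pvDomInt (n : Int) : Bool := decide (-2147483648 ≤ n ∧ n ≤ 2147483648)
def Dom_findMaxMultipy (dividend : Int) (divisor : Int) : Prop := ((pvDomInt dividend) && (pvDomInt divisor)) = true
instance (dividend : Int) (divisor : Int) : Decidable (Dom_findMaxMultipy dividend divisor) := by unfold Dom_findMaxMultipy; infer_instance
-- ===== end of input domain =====

-- B replaces A's doubling loop by a closed form from dividend//divisor's bit length (objective: simpler).

-- ===== PORT A =====
-- Python's `x << 1` is exactly `x * 2` on every int. The `1 ≤ divisor` half of the
-- guard is a totality guard only: when it fails while divisor ≤ dividend, the Python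
-- loop never terminates (divisor stays ≤ 0), which Pre_ excludes.
def findMaxMultipyLoop (dividend divisor z n max_divisor : Int) : Int × Int × Int :=
  if h : divisor ≤ dividend ∧ 1 ≤ divisor then
    findMaxMultipyLoop dividend (divisor * 2) (if z = 0 then 1 else z * 2) (n + 1) divisor
  else (z, n, max_divisor)
termination_by (dividend - divisor + 1).toNat
decreasing_by obtain ⟨h1, h2⟩ := h; omega

def findMaxMultipy (dividend : Int) (divisor : Int) : Int × Int × Int :=
  findMaxMultipyLoop dividend divisor 0 0 divisor

-- ===== PORT B =====
-- `1 << (k-1)` = `2 ^ (k-1)`, `divisor << (k-1)` = `divisor * 2 ^ (k-1)` (k ≥ 1 in this branch).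
def findMaxMultipy_alt (dividend : Int) (divisor : Int) : Int × Int × Int :=
  if divisor > dividend then (0, 0, divisor)
  else
    let k := PySem.Int.bitLength (PySem.Int.floordiv dividend divisor)
    (2 ^ (k - 1), (k : Int), divisor * 2 ^ (k - 1))

-- ===== PRECONDITION & SPEC =====
-- Pre_ excludes divisor ≤ 0 with divisor ≤ dividend, where Python A never terminates
-- (left-shifting a non-positive divisor can never exceed dividend).
def Pre_findMaxMultipy (dividend : Int) (divisor : Int) : Prop :=
  1 ≤ divisor ∨ dividend < divisor
instance (dividend : Int) (divisor : Int) : Decidable (Pre_findMaxMultipy dividend divisor) := by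
  unfold Pre_findMaxMultipy; infer_instance

def pvWitness_findMaxMultipy : Int × Int := (100, 7)

def Spec_findMaxMultipy (dividend : Int) (divisor : Int) (out : Int × Int × Int) : Prop :=
  out = findMaxMultipy_alt dividend divisor
instance (dividend : Int) (divisor : Int) (out : Int × Int × Int) : Decidable (Spec_findMaxMultipy dividend divisor out) := by
  unfold Spec_findMaxMultipy; infer_instance

-- ===== CLAIM (what is proved, stated in full; the proofs are below) =====
def Claim_equal_findMaxMultipy : Prop := ∀ (dividend : Int) (divisor : Int), Dom_findMaxMultipy dividend divisor → Pre_findMaxMultipy dividend divisor → Spec_findMaxMultipy dividend divisor (findMaxMultipy dividend divisor)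

-- ===== LEMMAS AND PROOFS =====

-- divisor halving step for the quotient's bit length
lemma bitLength_step (D d : Int) (hd : 1 ≤ d) (h2 : d * 2 ≤ D) :
    PySem.Int.bitLength (PySem.Int.floordiv D d)
      = PySem.Int.bitLength (PySem.Int.floordiv D (d * 2)) + 1 := by
  have hq : 0 < PySem.Int.floordiv D d := by
    have := (PySem.Int.le_floordiv_iff_mul_le (a := D) (q := 1) (show (0:Int) < d by omega)).2
      (by omega)
    omega
  have hdiv : PySem.Int.floordiv D (d * 2) = PySem.Int.floordiv (PySem.Int.floordiv D d) 2 := by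
    rw [PySem.Int.floordiv_eq_ediv_of_pos (show (0:Int) < d * 2 by omega),
        PySem.Int.floordiv_eq_ediv_of_pos (show (0:Int) < 2 by omega),
        PySem.Int.floordiv_eq_ediv_of_pos (show (0:Int) < d by omega),
        Int.ediv_ediv_of_nonneg (by omega)]
  rw [hdiv, ← PySem.Int.bitLength_of_pos hq]

lemma bitLength_one_of (D d : Int) (hd : 1 ≤ d) (hle : d ≤ D) (hlt : D < d * 2) :
    PySem.Int.bitLength (PySem.Int.floordiv D d) = 1 := by
  have : PySem.Int.floordiv D d = 1 := by
    rw [PySem.Int.floordiv_eq_iff_of_pos (show (0:Int) < d by omega)]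
    constructor <;> omega
  rw [this]; decide

-- the loop with a positive accumulator z, characterised in closed form
lemma loop_pos (D : Int) : ∀ (meas : Nat) (d z n md : Int), (D - d).toNat ≤ meas →
    1 ≤ d → d ≤ D → 1 ≤ z →
    findMaxMultipyLoop D d z n md =
      (z * 2 ^ PySem.Int.bitLength (PySem.Int.floordiv D d),
       n + (PySem.Int.bitLength (PySem.Int.floordiv D d) : Int),
       d * 2 ^ (PySem.Int.bitLength (PySem.Int.floordiv D d) - 1)) := by
  intro meas
  induction meas with
  | zero =>
    intro d z n md hm hd hle hz
    have hdD : d = D := by omega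
    have hlt : ¬ (d * 2 ≤ D) := by omega
    rw [findMaxMultipyLoop, dif_pos ⟨hle, hd⟩, findMaxMultipyLoop,
        dif_neg (by exact fun h => hlt h.1)]
    rw [bitLength_one_of D d hd hle (by omega)]
    simp [if_neg (show ¬ z = 0 by omega)]
  | succ m ih =>
    intro d z n md hm hd hle hz
    rw [findMaxMultipyLoop, dif_pos ⟨hle, hd⟩]
    rw [if_neg (show ¬ z = 0 by omega)]
    by_cases h2 : d * 2 ≤ D
    · rw [ih (d * 2) (z * 2) (n + 1) d (by omega) (by omega) h2 (by omega)]
      rw [bitLength_step D d hd h2]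
      have hk' : 1 ≤ PySem.Int.bitLength (PySem.Int.floordiv D (d * 2)) := by
        have hq : 0 < PySem.Int.floordiv D (d * 2) := by
          have := (PySem.Int.le_floordiv_iff_mul_le (a := D) (q := 1)
            (show (0:Int) < d * 2 by omega)).2 (by omega)
          omega
        rw [PySem.Int.bitLength_of_pos hq]; omega
      refine Prod.ext ?_ (Prod.ext ?_ ?_) <;> simp
      · rw [pow_succ]; ring
      · omega
      · have hrw : PySem.Int.bitLength (PySem.Int.floordiv D (d * 2)) - 1 + 1
              = PySem.Int.bitLength (PySem.Int.floordiv D (d * 2)) := by omega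
        rw [← hrw, Nat.add_sub_cancel, pow_succ]
        ring
    · rw [findMaxMultipyLoop, dif_neg (by exact fun h => h2 h.1)]
      rw [bitLength_one_of D d hd hle (by omega)]
      simp

theorem findMaxMultipy_spec : Claim_equal_findMaxMultipy := by
  intro D d _hDom hPre
  unfold Spec_findMaxMultipy findMaxMultipy findMaxMultipy_alt
  by_cases hgt : d > D
  · rw [findMaxMultipyLoop, dif_neg (by exact fun h => absurd h.1 (by omega)), if_pos hgt]
  · have hle : d ≤ D := by omega
    have hd : 1 ≤ d := by rcases hPre with h | h; exact h; omega
    rw [if_neg hgt]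
    rw [findMaxMultipyLoop, dif_pos ⟨hle, hd⟩]
    simp only [if_true]
    by_cases h2 : d * 2 ≤ D
    · rw [loop_pos D (D - d * 2).toNat (d * 2) 1 (0 + 1) d (by omega) (by omega) h2 (by omega)]
      rw [bitLength_step D d hd h2]
      have hk' : 1 ≤ PySem.Int.bitLength (PySem.Int.floordiv D (d * 2)) := by
        have hq : 0 < PySem.Int.floordiv D (d * 2) := by
          have := (PySem.Int.le_floordiv_iff_mul_le (a := D) (q := 1)
            (show (0:Int) < d * 2 by omega)).2 (by omega)
          omega
        rw [PySem.Int.bitLength_of_pos hq]; omega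
      refine Prod.ext ?_ (Prod.ext ?_ ?_) <;> simp
      · omega
      · have hrw : PySem.Int.bitLength (PySem.Int.floordiv D (d * 2)) - 1 + 1
              = PySem.Int.bitLength (PySem.Int.floordiv D (d * 2)) := by omega
        rw [← hrw, Nat.add_sub_cancel, pow_succ]
        ring
    · rw [findMaxMultipyLoop, dif_neg (by exact fun h => h2 h.1)]
      rw [bitLength_one_of D d hd hle (by omega)]
      simp
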